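-- pv_equiv track=rewrite | github.com/p2jason/dragonito | table_gen.py | compute_min_k_for_single
-- ===== SOURCE A (Python) =====
-- def compute_min_k_for_single(A, B, max_m):
-- 	C = A % B
--
-- 	if C == 0: return 0
-- 	if B > max_m * C: return 0
--
-- 	for i in range(0, 1024):
-- 		k = 1 << i
--
-- 		if k * C * max_m - B * max_m * ((k * C) // B) < k * B:
-- 			return i
--
-- 	raise Exception("Not enough bits in k")
-- ===== SOURCE B (Python) =====
-- def compute_min_k_for_single(A, B, max_m):
-- 	C = A % B
-- 	if C == 0: return 0
-- 	if B > max_m * C: return 0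
--
-- 	# The predicate P(i): max_m * ((C << i) % B) < (B << i) is upward-closed in i
-- 	# for B > 0 (doubling a remainder mod B at most doubles it), so the least i
-- 	# satisfying it can be found by binary search over [0, 1024).
-- 	lo, hi = 0, 1024
-- 	while lo < hi:
-- 		mid = (lo + hi) // 2
-- 		if max_m * ((C << mid) % B) < (B << mid):
-- 			hi = mid
-- 		else:
-- 			lo = mid + 1
--
-- 	if lo == 1024:
-- 		raise Exception("Not enough bits in k")
--
-- 	return lo
-- ===== Notes on version B (the rewrite author's own statement) =====
-- stated objective: alternative
-- what changed: B replaces A's linear scan over i=0..1023 with a binary search for the least i satisfying the test, which is valid because the test max_m*((C<<i)%B) < (B<<i) is upward-closed in i for B>0 (doubling a remainder mod B at most doubles it); ~10 probes instead of up to 1024 iterations.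
import Mathlib
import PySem

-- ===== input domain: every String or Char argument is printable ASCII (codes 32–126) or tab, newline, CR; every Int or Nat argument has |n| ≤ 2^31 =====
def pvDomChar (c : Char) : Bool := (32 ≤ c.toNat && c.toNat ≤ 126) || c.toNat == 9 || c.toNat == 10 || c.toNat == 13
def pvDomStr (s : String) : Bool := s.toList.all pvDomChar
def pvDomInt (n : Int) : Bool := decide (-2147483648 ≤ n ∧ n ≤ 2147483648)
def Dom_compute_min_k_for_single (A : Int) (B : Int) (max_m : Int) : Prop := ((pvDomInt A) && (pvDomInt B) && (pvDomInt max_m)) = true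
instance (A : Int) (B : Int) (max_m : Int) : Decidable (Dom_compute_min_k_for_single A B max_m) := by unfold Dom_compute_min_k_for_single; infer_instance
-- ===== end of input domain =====

-- B replaces A's linear scan over i = 0..1023 with a binary search for the least i
-- satisfying the test, valid because the test is upward-closed in i for B > 0
-- (doubling a remainder mod B at most doubles it). Alternative algorithm, same result.

-- ===== PORT A =====
-- the 'for i in range(0, 1024)' loop of A; -1 stands for the raised Exception
-- (such inputs are excluded by Pre_).
def pvALoop (C B max_m : Int) : Nat → Nat → Int
  | 0, _ => -1
  | fuel+1, i =>
    let k : Int := (1:Int) <<< i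
    if k * C * max_m - B * max_m * (PySem.Int.floordiv (k * C) B) < k * B then (i : Int)
    else pvALoop C B max_m fuel (i + 1)

def compute_min_k_for_single (A : Int) (B : Int) (max_m : Int) : Int :=
  let C := PySem.Int.mod A B
  if C = 0 then 0
  else if max_m * C < B then 0
  else pvALoop C B max_m 1024 0

-- ===== PORT B =====
-- B's 'while lo < hi' binary search; fuel 1024 is more than the ≤ 10 halvings needed.
def pvBSearch (C B max_m : Int) : Nat → Nat → Nat → Nat
  | 0, lo, _ => lo
  | fuel+1, lo, hi =>
    if lo < hi then
      let mid := (lo + hi) / 2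
      if max_m * PySem.Int.mod (C <<< mid) B < B <<< mid then
        pvBSearch C B max_m fuel lo mid
      else
        pvBSearch C B max_m fuel (mid + 1) hi
    else lo

-- -1 stands for the raised Exception (excluded by Pre_).
def compute_min_k_for_single_alt (A : Int) (B : Int) (max_m : Int) : Int :=
  let C := PySem.Int.mod A B
  if C = 0 then 0
  else if max_m * C < B then 0
  else
    let lo := pvBSearch C B max_m 1024 0 1024
    if lo = 1024 then -1 else (lo : Int)

-- ===== PRECONDITION & SPEC =====
-- Pre_ excludes exactly the inputs where the Python A raises: B = 0 (ZeroDivisionError),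
-- and B < 0 past both early returns, where the loop condition provably never fires and A
-- raises 'Not enough bits in k'.
def Pre_compute_min_k_for_single (A : Int) (B : Int) (max_m : Int) : Prop :=
  B ≠ 0 ∧ (0 < B ∨ PySem.Int.mod A B = 0 ∨ max_m * PySem.Int.mod A B < B)

instance (A : Int) (B : Int) (max_m : Int) : Decidable (Pre_compute_min_k_for_single A B max_m) := by
  unfold Pre_compute_min_k_for_single; infer_instance

def pvWitness_compute_min_k_for_single : Int × Int × Int := (7, 20, 5)

def Spec_compute_min_k_for_single (A : Int) (B : Int) (max_m : Int) (out : Int) : Prop := out = compute_min_k_for_single_alt A B max_m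
instance (A : Int) (B : Int) (max_m : Int) (out : Int) : Decidable (Spec_compute_min_k_for_single A B max_m out) := by unfold Spec_compute_min_k_for_single; infer_instance

-- ===== CLAIM (what is proved, stated in full; the proofs are below) =====
def Claim_equal_compute_min_k_for_single : Prop := ∀ (A : Int) (B : Int) (max_m : Int), Dom_compute_min_k_for_single A B max_m → Pre_compute_min_k_for_single A B max_m → Spec_compute_min_k_for_single A B max_m (compute_min_k_for_single A B max_m)

-- ===== LEMMAS AND PROOFS =====

-- the shared loop test, as a predicate on the exponent (abbrev: keeps it decidable)
abbrev pvP (C B max_m : Int) (i : Nat) : Prop :=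
  max_m * PySem.Int.mod (C <<< i) B < B <<< i

theorem pvShl (a : Int) (n : Nat) : a <<< n = a * 2 ^ n := by
  simp [Int.shiftLeft_eq]

-- Python-mod congruence: congruent arguments have equal remainders (any nonzero divisor).
theorem pvMod_congr (B x y : Int) (hB : B ≠ 0) (h : B ∣ (x - y)) :
    PySem.Int.mod x B = PySem.Int.mod y B := by
  obtain ⟨t, ht⟩ := h
  have hx := PySem.Int.floordiv_mul_add_mod x B
  have hy := PySem.Int.floordiv_mul_add_mod y B
  set f1 := PySem.Int.floordiv x B
  set f2 := PySem.Int.floordiv y B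
  set r1 := PySem.Int.mod x B
  set r2 := PySem.Int.mod y B
  have hs : r1 - r2 = B * (t - f1 + f2) := by linarith
  rcases lt_or_gt_of_ne hB with hneg | hpos
  · obtain ⟨b1l, b1u⟩ := PySem.Int.mod_neg_bounds (a := x) (b := B) hneg
    obtain ⟨b2l, b2u⟩ := PySem.Int.mod_neg_bounds (a := y) (b := B) hneg
    have h1 : (-B) * (t - f1 + f2) < (-B) * 1 := by nlinarith
    have h2 : (-B) * (-1) < (-B) * (t - f1 + f2) := by nlinarith
    have hBpos : (0:Int) < -B := by omega
    have hlt1 : t - f1 + f2 < 1 := lt_of_mul_lt_mul_left h1 (le_of_lt hBpos)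
    have hlt2 : -1 < t - f1 + f2 := lt_of_mul_lt_mul_left h2 (le_of_lt hBpos)
    have : t - f1 + f2 = 0 := by omega
    rw [this, mul_zero] at hs
    omega
  · have b1l := PySem.Int.mod_nonneg (a := x) (b := B) hpos
    have b1u := PySem.Int.mod_lt (a := x) (b := B) hpos
    have b2l := PySem.Int.mod_nonneg (a := y) (b := B) hpos
    have b2u := PySem.Int.mod_lt (a := y) (b := B) hpos
    have h1 : B * (t - f1 + f2) < B * 1 := by nlinarith
    have h2 : B * (-1) < B * (t - f1 + f2) := by nlinarith
    have hlt1 : t - f1 + f2 < 1 := lt_of_mul_lt_mul_left h1 (le_of_lt hpos)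
    have hlt2 : -1 < t - f1 + f2 := lt_of_mul_lt_mul_left h2 (le_of_lt hpos)
    have : t - f1 + f2 = 0 := by omega
    rw [this, mul_zero] at hs
    omega

-- the test is upward-closed in i when B > 0
theorem pvP_mono (C B max_m : Int) (hB : 0 < B) (i : Nat)
    (h : pvP C B max_m i) : pvP C B max_m (i + 1) := by
  unfold pvP at h ⊢
  set r := PySem.Int.mod (C <<< i) B with hr
  set r' := PySem.Int.mod (C <<< (i+1)) B with hr'
  have hBne : B ≠ 0 := ne_of_gt hB
  have hstep : r' = PySem.Int.mod (2 * r) B := by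
    apply pvMod_congr B _ _ hBne
    have hei := PySem.Int.floordiv_mul_add_mod (C <<< i) B
    refine ⟨2 * PySem.Int.floordiv (C <<< i) B, ?_⟩
    rw [pvShl, pvShl] at *
    ring_nf
    ring_nf at hei
    linarith
  have hr0 : 0 ≤ r := PySem.Int.mod_nonneg (a := C <<< i) (b := B) hB
  have hr'0 : 0 ≤ r' := PySem.Int.mod_nonneg (a := C <<< (i+1)) (b := B) hB
  -- r' ≤ 2r : the floor quotient of the nonnegative 2r by positive B is nonnegative
  have hle : r' ≤ 2 * r := by
    have hf := PySem.Int.floordiv_mul_add_mod (2 * r) B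
    set f2 := PySem.Int.floordiv (2 * r) B
    have hm0 : 0 ≤ PySem.Int.mod (2*r) B := PySem.Int.mod_nonneg (a := 2*r) (b := B) hB
    have hmB : PySem.Int.mod (2*r) B < B := PySem.Int.mod_lt (a := 2*r) (b := B) hB
    have hf2 : 0 ≤ f2 := by nlinarith
    have : 0 ≤ f2 * B := mul_nonneg hf2 (le_of_lt hB)
    rw [hstep]; linarith
  have hsh : (B <<< (i+1)) = 2 * (B <<< i) := by
    rw [pvShl, pvShl, pow_succ]; ring
  rcases lt_or_ge max_m 0 with hm | hm
  swap
  · have : max_m * r' ≤ max_m * (2 * r) := mul_le_mul_of_nonneg_left hle hm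
    rw [hsh]; linarith
  · have h1 : max_m * r' ≤ 0 := mul_nonpos_of_nonpos_of_nonneg (le_of_lt hm) hr'0
    have h2 : (0:Int) < B <<< (i+1) := by
      rw [pvShl]; positivity
    linarith

theorem pvP_mono_le (C B max_m : Int) (hB : 0 < B) {i j : Nat} (hij : i ≤ j)
    (h : pvP C B max_m i) : pvP C B max_m j := by
  induction j, hij using Nat.le_induction with
  | base => exact h
  | succ n _ ih => exact pvP_mono C B max_m hB n ih

-- A's raw loop test at exponent i is exactly pvP i
theorem pvACond (C B max_m : Int) (i : Nat) :
    (((1:Int) <<< i) * C * max_m - B * max_m * (PySem.Int.floordiv (((1:Int) <<< i) * C) B)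
      < ((1:Int) <<< i) * B) ↔ pvP C B max_m i := by
  unfold pvP
  have h1 : ((1:Int) <<< i) * C = C <<< i := by rw [pvShl, pvShl]; ring
  have h2 : ((1:Int) <<< i) * B = B <<< i := by rw [pvShl, pvShl]; ring
  have hmod := PySem.Int.floordiv_mul_add_mod (C <<< i) B
  rw [h1, h2]
  have hkey : (C <<< i) * max_m - B * max_m * (PySem.Int.floordiv (C <<< i) B)
      = max_m * PySem.Int.mod (C <<< i) B := by linear_combination (-max_m) * hmod
  rw [hkey]

theorem pvALoop_succ (C B max_m : Int) (fuel i : Nat) :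
    pvALoop C B max_m (fuel + 1) i =
      if ((1:Int) <<< i) * C * max_m - B * max_m * (PySem.Int.floordiv (((1:Int) <<< i) * C) B)
          < ((1:Int) <<< i) * B then (i : Int)
      else pvALoop C B max_m fuel (i + 1) := rfl

theorem pvALoop_step (C B max_m : Int) (fuel i : Nat) :
    pvALoop C B max_m (fuel + 1) i =
      if pvP C B max_m i then (i : Int) else pvALoop C B max_m fuel (i + 1) := by
  rw [pvALoop_succ]
  exact if_congr (pvACond C B max_m i) rfl rfl

-- A's loop returns the least admissible exponent in its window, or -1
theorem pvALoop_none (C B max_m : Int) : ∀ (fuel i : Nat),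
    (∀ j, i ≤ j → j < i + fuel → ¬ pvP C B max_m j) → pvALoop C B max_m fuel i = -1 := by
  intro fuel
  induction fuel with
  | zero => intro i _; rfl
  | succ n ih =>
    intro i h
    rw [pvALoop_step, if_neg (h i le_rfl (by omega))]
    exact ih (i + 1) (fun j h1 h2 => h j (by omega) (by omega))

theorem pvALoop_least (C B max_m : Int) : ∀ (fuel i j : Nat),
    i ≤ j → j < i + fuel → pvP C B max_m j →
    (∀ j', i ≤ j' → j' < j → ¬ pvP C B max_m j') →
    pvALoop C B max_m fuel i = (j : Int) := by
  intro fuel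
  induction fuel with
  | zero => intro i j h1 h2; omega
  | succ n ih =>
    intro i j h1 h2 hP hmin
    rw [pvALoop_step]
    by_cases hi : pvP C B max_m i
    · have : j = i := by
        by_contra hne
        exact hmin i le_rfl (by omega) hi
      rw [this]; exact if_pos hi
    · rw [if_neg hi]
      have hij : i ≠ j := fun he => hi (he ▸ hP)
      exact ih (i + 1) j (by omega) (by omega) hP (fun j' ha hb => hmin j' (by omega) hb)

theorem pvBSearch_succ (C B max_m : Int) (fuel lo hi : Nat) :
    pvBSearch C B max_m (fuel + 1) lo hi =
      if lo < hi then
        (if max_m * PySem.Int.mod (C <<< ((lo + hi) / 2)) B < B <<< ((lo + hi) / 2) then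
          pvBSearch C B max_m fuel lo ((lo + hi) / 2)
        else
          pvBSearch C B max_m fuel ((lo + hi) / 2 + 1) hi)
      else lo := rfl

-- binary-search invariant: everything below the result fails, the result (if < 1024) passes
theorem pvBSearch_spec (C B max_m : Int) (hB : 0 < B) : ∀ (fuel lo hi : Nat),
    lo ≤ hi → hi ≤ 1024 → hi - lo ≤ fuel →
    (∀ j, j < lo → ¬ pvP C B max_m j) → (hi = 1024 ∨ pvP C B max_m hi) →
    (∀ j, j < pvBSearch C B max_m fuel lo hi → ¬ pvP C B max_m j) ∧
    (pvBSearch C B max_m fuel lo hi = 1024 ∨ pvP C B max_m (pvBSearch C B max_m fuel lo hi)) ∧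
    pvBSearch C B max_m fuel lo hi ≤ 1024 := by
  intro fuel
  induction fuel with
  | zero =>
    intro lo hi h1 h2 h3 hlow hup
    have : lo = hi := by omega
    subst this
    exact ⟨hlow, hup, h2⟩
  | succ n ih =>
    intro lo hi h1 h2 h3 hlow hup
    by_cases hlt : lo < hi
    · have hmid1 : lo ≤ (lo + hi) / 2 := by omega
      have hmid2 : (lo + hi) / 2 < hi := by omega
      by_cases hc : max_m * PySem.Int.mod (C <<< ((lo + hi) / 2)) B < B <<< ((lo + hi) / 2)
      · have heq : pvBSearch C B max_m (n+1) lo hi = pvBSearch C B max_m n lo ((lo + hi) / 2) := by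
          rw [pvBSearch_succ, if_pos hlt, if_pos hc]
        rw [heq]
        exact ih lo ((lo + hi) / 2) hmid1 (by omega) (by omega) hlow (Or.inr hc)
      · have heq : pvBSearch C B max_m (n+1) lo hi = pvBSearch C B max_m n ((lo + hi) / 2 + 1) hi := by
          rw [pvBSearch_succ, if_pos hlt, if_neg hc]
        rw [heq]
        refine ih ((lo + hi) / 2 + 1) hi (by omega) h2 (by omega) ?_ hup
        intro j hj
        by_cases hjlo : j < lo
        · exact hlow j hjlo
        · intro hPj
          exact hc (pvP_mono_le C B max_m hB (i := j) (j := (lo + hi) / 2) (by omega) hPj)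
    · have heq : pvBSearch C B max_m (n+1) lo hi = lo := by
        rw [pvBSearch_succ, if_neg hlt]
      have : lo = hi := by omega
      rw [heq, this]
      exact ⟨this ▸ hlow, hup, h2⟩

-- ===== VERDICT (by name: the statement is the Claim_ definition above) =====
theorem compute_min_k_for_single_spec : Claim_equal_compute_min_k_for_single := by
  intro A B max_m _ hPre
  obtain ⟨hBne, hPre2⟩ := hPre
  unfold Spec_compute_min_k_for_single
  unfold compute_min_k_for_single compute_min_k_for_single_alt
  by_cases hC : PySem.Int.mod A B = 0
  · rw [if_pos hC, if_pos hC]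
  · rw [if_neg hC, if_neg hC]
    by_cases hg : max_m * PySem.Int.mod A B < B
    · rw [if_pos hg, if_pos hg]
    · rw [if_neg hg, if_neg hg]
      have hB : 0 < B := by
        rcases hPre2 with h | h | h
        · exact h
        · exact absurd h hC
        · exact absurd h hg
      set C := PySem.Int.mod A B
      obtain ⟨hlow, hup, hle⟩ :=
        pvBSearch_spec C B max_m hB 1024 0 1024 (by omega) le_rfl (by omega)
          (fun j hj => absurd hj (Nat.not_lt_zero j)) (Or.inl rfl)
      set r := pvBSearch C B max_m 1024 0 1024
      by_cases hr : r = 1024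
      · rw [if_pos hr]
        apply pvALoop_none
        intro j _ hj
        exact hlow j (by omega)
      · rw [if_neg hr]
        have hPr : pvP C B max_m r := hup.resolve_left hr
        exact pvALoop_least C B max_m 1024 0 r (Nat.zero_le r) (by omega) hPr
          (fun j' _ hj' => hlow j' hj')
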